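-- pv_equiv track=rewrite | github.com/rangoren/clinical-agent | services/study_service.py | _coverage_first_candidates
-- ===== SOURCE A (Python) =====
-- def _recent_unique_topics(state, limit=4):
--     recent_topics = state.get("recent_topic_history") or []
--     deduped = []
--     seen = set()
--     for topic in reversed(recent_topics):
--         if not topic or topic in seen:
--             continue
--         seen.add(topic)
--         deduped.append(topic)
--         if len(deduped) >= limit:
--             break
--     return set(deduped)
--
-- def _coverage_first_candidates(candidates, state, used_topics=None):
--     if not candidates:
--         return []
--
--     used_topics = set(used_topics or set())
--     recent_topics = _recent_unique_topics(state, limit=4)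
--
--     fresh_topic_candidates = [
--         item for item in candidates
--         if item.get("topic") not in used_topics and item.get("topic") not in recent_topics
--     ]
--     if fresh_topic_candidates:
--         return fresh_topic_candidates
--
--     unused_in_card_candidates = [item for item in candidates if item.get("topic") not in used_topics]
--     if unused_in_card_candidates:
--         return unused_in_card_candidates
--
--     return candidates
-- ===== SOURCE B (Python) =====
-- def _recent_unique_topics(state, limit=4):
--     recent_topics = state.get("recent_topic_history") or []
--     deduped = []
--     seen = set()
--     for topic in reversed(recent_topics):
--         if not topic or topic in seen:
--             continue
--         seen.add(topic)
--         deduped.append(topic)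
--         if len(deduped) >= limit:
--             break
--     return set(deduped)
--
-- def _coverage_first_candidates(candidates, state, used_topics=None):
--     if not candidates:
--         return []
--     used = set(used_topics or set())
--     recent = _recent_unique_topics(state, limit=4)
--
--     def tier(item):
--         topic = item.get("topic")
--         if topic in used:
--             return 2
--         if topic in recent:
--             return 1
--         return 0
--
--     tiers = [tier(item) for item in candidates]
--     best = min(tiers)
--     return [item for item, t in zip(candidates, tiers) if t == best]
-- ===== Notes on version B (the rewrite author's own statement) =====
-- stated objective: alternative
-- what changed: Replaced A's staged fallback (fresh filter, then unused filter, then all) by a rank-and-select-min algorithm: each candidate gets a tier (0 fresh, 1 recent-only, 2 used) in one pass, and the result is the candidates whose tier equals the minimum tier.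
import Mathlib
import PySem

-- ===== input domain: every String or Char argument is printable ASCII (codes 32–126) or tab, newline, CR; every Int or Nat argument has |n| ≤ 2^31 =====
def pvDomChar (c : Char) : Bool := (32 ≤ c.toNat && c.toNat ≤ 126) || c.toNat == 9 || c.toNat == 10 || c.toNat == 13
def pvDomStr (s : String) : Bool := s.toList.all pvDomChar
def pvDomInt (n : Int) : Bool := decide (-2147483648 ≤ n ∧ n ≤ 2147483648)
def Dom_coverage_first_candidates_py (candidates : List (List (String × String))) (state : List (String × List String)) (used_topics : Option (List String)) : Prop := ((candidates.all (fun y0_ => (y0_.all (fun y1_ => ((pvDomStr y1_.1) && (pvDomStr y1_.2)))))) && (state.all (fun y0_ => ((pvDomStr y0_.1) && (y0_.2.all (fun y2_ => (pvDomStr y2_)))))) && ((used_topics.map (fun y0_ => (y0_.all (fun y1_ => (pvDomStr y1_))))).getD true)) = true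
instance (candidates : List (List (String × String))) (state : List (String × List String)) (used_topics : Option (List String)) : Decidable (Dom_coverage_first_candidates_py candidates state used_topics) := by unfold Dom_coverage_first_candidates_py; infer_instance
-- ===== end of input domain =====

-- B replaces A's staged fallback filters by rank-and-select-min: every candidate gets a tier
-- (0 fresh, 1 recent-only, 2 used) and the result is the candidates of minimal tier;
-- objective: alternative algorithm (same asymptotic cost).

-- shared helper: the Python helper _recent_unique_topics, identical in both sources
def pvRecentGo : List String → PySem.Set String → List String → List String
  | [], _, deduped => deduped
  | topic :: rest, seen, deduped =>
    if topic = "" || PySem.Set.contains seen topic then pvRecentGo rest seen deduped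
    else
      let seen' := PySem.Set.add seen topic
      let deduped' := deduped ++ [topic]
      if 4 ≤ deduped'.length then deduped' else pvRecentGo rest seen' deduped'

def pvRecentUniqueTopics (state : List (String × List String)) : PySem.Set String :=
  let recent_topics := ((PySem.Dict.mk state).get? "recent_topic_history").getD []
  PySem.Set.ofList (pvRecentGo recent_topics.reverse PySem.Set.empty [])

-- item.get("topic")
def pvTopicOf (item : List (String × String)) : Option String :=
  (PySem.Dict.mk item).get? "topic"

-- Python 'x in s' where x may be None (None is never in a set of strings)
def pvMem (o : Option String) (s : PySem.Set String) : Bool :=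
  match o with
  | none => false
  | some t => PySem.Set.contains s t

-- ===== PORT A =====
def coverage_first_candidates_py (candidates : List (List (String × String))) (state : List (String × List String)) (used_topics : Option (List String)) : List (List (String × String)) :=
  if candidates = [] then []
  else
    let used := PySem.Set.ofList (used_topics.getD [])
    let recent := pvRecentUniqueTopics state
    let fresh_topic_candidates := candidates.filter
      (fun item => !pvMem (pvTopicOf item) used && !pvMem (pvTopicOf item) recent)
    if fresh_topic_candidates = [] then
      let unused_in_card_candidates := candidates.filter (fun item => !pvMem (pvTopicOf item) used)
      if unused_in_card_candidates = [] then candidates else unused_in_card_candidates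
    else fresh_topic_candidates

-- ===== PORT B =====
-- B's tier function: 2 = topic used, 1 = merely recent, 0 = fresh
def pvTier (used recent : PySem.Set String) (item : List (String × String)) : Nat :=
  if pvMem (pvTopicOf item) used then 2
  else if pvMem (pvTopicOf item) recent then 1
  else 0

def coverage_first_candidates_py_alt (candidates : List (List (String × String))) (state : List (String × List String)) (used_topics : Option (List String)) : List (List (String × String)) :=
  if candidates = [] then []
  else
    let used := PySem.Set.ofList (used_topics.getD [])
    let recent := pvRecentUniqueTopics state
    let tiers := candidates.map (pvTier used recent)
    let best := (PySem.List.min? tiers (fun t => t)).getD 0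
    ((candidates.zip tiers).filter (fun p => p.2 == best)).map Prod.fst

-- ===== PRECONDITION & SPEC =====
def Spec_coverage_first_candidates_py (candidates : List (List (String × String))) (state : List (String × List String)) (used_topics : Option (List String)) (out : List (List (String × String))) : Prop := out = coverage_first_candidates_py_alt candidates state used_topics
instance (candidates : List (List (String × String))) (state : List (String × List String)) (used_topics : Option (List String)) (out : List (List (String × String))) : Decidable (Spec_coverage_first_candidates_py candidates state used_topics out) := by unfold Spec_coverage_first_candidates_py; infer_instance

-- ===== CLAIM (what is proved, stated in full; the proofs are below) =====
def Claim_equal_coverage_first_candidates_py : Prop := ∀ (candidates : List (List (String × String))) (state : List (String × List String)) (used_topics : Option (List String)), Dom_coverage_first_candidates_py candidates state used_topics → Spec_coverage_first_candidates_py candidates state used_topics (coverage_first_candidates_py candidates state used_topics)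

-- ===== LEMMAS AND PROOFS =====

-- filtering the (item, tier) zip on the tier and projecting back is filtering on the tier of the item
theorem pvZipMapFilter {α : Type} (g : α → Nat) (b : Nat) :
    ∀ (l : List α), ((l.zip (l.map g)).filter (fun p => p.2 == b)).map Prod.fst
      = l.filter (fun x => g x == b) := by
  intro l
  induction l with
  | nil => simp
  | cons x xs ih =>
    simp only [List.map_cons, List.zip_cons_cons, List.filter_cons]
    by_cases h : (g x == b) = true
    · simp [h, ih]
    · simp [h, ih]

-- tier takes only the values 0, 1, 2
theorem pvTier_cases (used recent : PySem.Set String) (it : List (String × String)) :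
    pvTier used recent it = 0 ∨ pvTier used recent it = 1 ∨ pvTier used recent it = 2 := by
  unfold pvTier
  split_ifs <;> simp

-- tier 0 ↔ A's fresh predicate; tier ≠ 2 ↔ A's unused predicate
theorem pvTier_eq_zero (used recent : PySem.Set String) (it : List (String × String)) :
    (pvTier used recent it = 0)
      ↔ (!pvMem (pvTopicOf it) used && !pvMem (pvTopicOf it) recent) = true := by
  unfold pvTier; split_ifs <;> simp_all

theorem pvTier_ne_two (used recent : PySem.Set String) (it : List (String × String)) :
    (pvTier used recent it ≠ 2) ↔ (!pvMem (pvTopicOf it) used) = true := by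
  unfold pvTier; split_ifs <;> simp_all

-- ===== VERDICT (by name: the statement is the Claim_ definition above) =====
theorem coverage_first_candidates_py_spec : Claim_equal_coverage_first_candidates_py := by
  intro candidates state used_topics _
  unfold Spec_coverage_first_candidates_py coverage_first_candidates_py coverage_first_candidates_py_alt
  by_cases hnil : candidates = []
  · simp [hnil]
  · simp only [hnil, if_false]
    set used := PySem.Set.ofList (used_topics.getD []) with hused
    set recent := pvRecentUniqueTopics state with hrecent
    set g := pvTier used recent with hg
    obtain ⟨x, xs, rfl⟩ := List.exists_cons_of_ne_nil hnil
    rw [pvZipMapFilter]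
    set best := (PySem.List.min? ((x :: xs).map g) (fun t => t)).getD 0 with hbest
    -- best is the tier of some candidate, and ≤ every candidate's tier
    have hmin : PySem.List.min? ((x :: xs).map g) (fun t => t) = some ((xs.map g).foldl min (g x)) := by
      simp [PySem.List.min?_id_cons]
    have hbest_eq : best = (xs.map g).foldl min (g x) := by rw [hbest, hmin]; rfl
    have hle : ∀ y ∈ x :: xs, best ≤ g y := by
      intro y hy
      rcases List.mem_cons.mp hy with h | h
      · subst h; rw [hbest_eq]; exact (PySem.List.foldl_min_le (xs.map g) (g y)).1
      · rw [hbest_eq]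
        exact (PySem.List.foldl_min_le (xs.map g) (g x)).2 (g y) (List.mem_map_of_mem h)
    have hmem : ∃ y ∈ x :: xs, best = g y := by
      rcases PySem.List.foldl_min_mem (xs.map g) (g x) with h | h
      · exact ⟨x, List.mem_cons_self .., by rw [hbest_eq, h]⟩
      · rcases List.mem_map.mp h with ⟨y, hy, hgy⟩
        exact ⟨y, List.mem_cons_of_mem _ hy, by rw [hbest_eq, ← hgy]⟩
    by_cases hfresh : (x :: xs).filter (fun item => !pvMem (pvTopicOf item) used && !pvMem (pvTopicOf item) recent) = []
    · -- no fresh candidate: every tier ≥ 1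
      have hno0 : ∀ y ∈ x :: xs, g y ≠ 0 := by
        intro y hy h0
        exact List.filter_eq_nil_iff.mp hfresh y hy ((pvTier_eq_zero used recent y).mp h0)
      by_cases hunused : (x :: xs).filter (fun item => !pvMem (pvTopicOf item) used) = []
      · -- everything used: every tier = 2, best = 2, B keeps all
        have hall2 : ∀ y ∈ x :: xs, g y = 2 := by
          intro y hy
          by_contra h
          exact List.filter_eq_nil_iff.mp hunused y hy ((pvTier_ne_two used recent y).mp h)
        have hb2 : best = 2 := by
          obtain ⟨y, hy, hb⟩ := hmem; rw [hb, hall2 y hy]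
        rw [if_pos hfresh, if_pos hunused]
        exact (List.filter_eq_self.mpr (fun y hy => by simp [hall2 y hy, hb2])).symm
      · -- some unused candidate: best = 1, B's filter equals A's unused filter
        obtain ⟨z, hzf⟩ := List.exists_mem_of_ne_nil _ hunused
        have hz : z ∈ x :: xs := (List.mem_filter.mp hzf).1
        have hzp : (!pvMem (pvTopicOf z) used) = true := (List.mem_filter.mp hzf).2
        have hz1 : g z = 1 := by
          rcases pvTier_cases used recent z with h | h | h
          · exact absurd h (hno0 z hz)
          · exact h
          · exact absurd ((pvTier_ne_two used recent z).mpr hzp) (by simp [h])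
        have hb1 : best = 1 := by
          have h1 := hle z hz
          rw [hz1] at h1
          obtain ⟨y, hy, hb⟩ := hmem
          have := hno0 y hy
          omega
        rw [if_pos hfresh, if_neg hunused, hb1]
        apply List.filter_congr
        intro y hy
        rcases pvTier_cases used recent y with h | h | h
        · exact absurd h (hno0 y hy)
        · rw [show g y = 1 from h]
          simp [(pvTier_ne_two used recent y).mp (by simp [h])]
        · have hbool : (!pvMem (pvTopicOf y) used) = false := by
            cases hB : (!pvMem (pvTopicOf y) used) with
            | false => rfl
            | true => exact absurd h ((pvTier_ne_two used recent y).mpr hB)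
          rw [show g y = 2 from h]
          simp [hbool]
    · -- some fresh candidate: best = 0, B's filter equals A's fresh filter
      obtain ⟨z, hzf⟩ := List.exists_mem_of_ne_nil _ hfresh
      have hz0 : g z = 0 := (pvTier_eq_zero used recent z).mpr (List.mem_filter.mp hzf).2
      have hb0 : best = 0 := by
        have := hle z (List.mem_filter.mp hzf).1
        omega
      rw [if_neg hfresh, hb0]
      apply List.filter_congr
      intro y hy
      by_cases h : g y = 0
      · simp [h, (pvTier_eq_zero used recent y).mp h]
      · have hL : (!pvMem (pvTopicOf y) used && !pvMem (pvTopicOf y) recent) = false := by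
          cases hB : (!pvMem (pvTopicOf y) used && !pvMem (pvTopicOf y) recent) with
          | false => rfl
          | true => exact absurd ((pvTier_eq_zero used recent y).mpr hB) h
        simp [h, hL]
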